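-- pv_equiv track=rewrite | github.com/ljm0850/algo-problem | 15903 카드 합체 놀이.py | solution
-- ===== SOURCE A (Python) =====
-- from heapq import heappush,heappop,heapify
--
-- def solution(cards:list[int],cnt:int)->int:
--     heapify(cards)
--     for _ in range(cnt):
--         a = heappop(cards)
--         b = heappop(cards)
--         c = a + b
--         for __ in range(2):
--             heappush(cards,c)
--     return sum(cards)
-- ===== SOURCE B (Python) =====
-- def solution(cards, cnt):
--     orig = sorted(cards)
--     made = []
--     i = 0
--     j = 0
--     for _ in range(cnt):
--         if j < len(made) and (i >= len(orig) or made[j] <= orig[i]):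
--             a = made[j]; j += 1
--         else:
--             a = orig[i]; i += 1
--         if j < len(made) and (i >= len(orig) or made[j] <= orig[i]):
--             b = made[j]; j += 1
--         else:
--             b = orig[i]; i += 1
--         c = a + b
--         made.append(c); made.append(c)
--     return sum(orig[i:]) + sum(made[j:])
-- ===== Notes on version B (the rewrite author's own statement) =====
-- stated objective: alternative
-- what changed: Replaces the binary heap (heapify/heappop/heappush) by the two-queue Huffman-merge technique: sort once, then serve each round's two smallest from the sorted-originals pointer and a pending-merges queue that stays sorted by construction; O(n log n + cnt) instead of heap operations per round.
import Mathlib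
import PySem

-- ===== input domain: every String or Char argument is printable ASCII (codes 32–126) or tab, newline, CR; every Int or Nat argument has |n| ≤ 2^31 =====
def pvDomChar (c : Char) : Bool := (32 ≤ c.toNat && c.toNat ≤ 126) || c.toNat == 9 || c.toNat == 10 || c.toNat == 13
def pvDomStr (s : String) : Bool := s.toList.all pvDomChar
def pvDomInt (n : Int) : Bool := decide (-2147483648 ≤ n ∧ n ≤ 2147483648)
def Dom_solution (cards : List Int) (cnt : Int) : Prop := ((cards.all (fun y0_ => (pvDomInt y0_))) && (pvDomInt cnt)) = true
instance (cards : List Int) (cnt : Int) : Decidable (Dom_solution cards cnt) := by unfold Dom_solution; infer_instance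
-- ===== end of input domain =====

-- B replaces the binary heap by the two-queue merge: sort once, then serve each round's
-- two smallest from the sorted originals and a pending queue of merged values.
-- Note: Python A heapifies `cards` in place (observable mutation); B rebinds a fresh list.
-- The equivalence proved here is about the RETURN value only.

-- ===== PORT A =====
-- heapq is not covered by PySem; heappop/heappush are ported by their effect on the
-- heap's VALUES (heappop removes and returns a smallest element, heappush appends):
-- exact for the returned sum, which depends only on the multiset held by the heap.
def heapPopA (xs : List Int) : Option (Int × List Int) :=
  match xs.min? with
  | none => none
  | some m => some (m, xs.erase m)

def solutionLoopA : Nat → List Int → Option (List Int)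
  | 0, xs => some xs
  | n+1, xs =>
    match heapPopA xs with
    | none => none
    | some (a, xs1) =>
      match heapPopA xs1 with
      | none => none
      | some (b, xs2) => solutionLoopA n (xs2 ++ [a + b, a + b])

def solution (cards : List Int) (cnt : Int) : Int :=
  match solutionLoopA cnt.toNat cards with
  | some xs => xs.sum
  | none => 0   -- unreachable under Pre_solution (Python raises IndexError)

-- ===== PORT B =====
-- Source B's index pointers i into `orig` and j into `made` are ported as the suffixes
-- `restO` (= orig[i:]) and `pend` (= made[j:]): 'i += 1' / 'j += 1' take the tail and
-- 'made.append(c)' appends at the back; the consumed prefixes are never read again.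
-- pickB is Source B's repeated pick-the-smaller-front if/else block; `none` is its
-- IndexError on `orig[i]` with i >= len(orig).
def pickB (restO pend : List Int) : Option (Int × List Int × List Int) :=
  match pend with
  | p :: ps =>
    match restO with
    | [] => some (p, [], ps)
    | o :: os => if p ≤ o then some (p, o :: os, ps) else some (o, os, p :: ps)
  | [] =>
    match restO with
    | o :: os => some (o, os, [])
    | [] => none

def loopB : Nat → List Int → List Int → Option (List Int × List Int)
  | 0, restO, pend => some (restO, pend)
  | n+1, restO, pend =>
    match pickB restO pend with
    | none => none
    | some (a, r1, p1) =>
      match pickB r1 p1 with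
      | none => none
      | some (b, r2, p2) => loopB n r2 (p2 ++ [a + b, a + b])

def solution_alt (cards : List Int) (cnt : Int) : Int :=
  match loopB cnt.toNat (PySem.List.sorted cards (fun x => x) false) [] with
  | some (restO, pend) => restO.sum + pend.sum
  | none => 0   -- unreachable under Pre_solution (Python raises IndexError)

-- ===== PRECONDITION & SPEC =====
-- Pre_ excludes exactly the inputs where A raises IndexError: a heappop from a heap
-- with fewer than two elements (the heap's size is invariant across iterations).
def Pre_solution (cards : List Int) (cnt : Int) : Prop := 1 ≤ cnt → 2 ≤ cards.length
instance (cards : List Int) (cnt : Int) : Decidable (Pre_solution cards cnt) := by unfold Pre_solution; infer_instance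
def pvWitness_solution : List Int × Int := ([3, 1, 2], 2)
def Spec_solution (cards : List Int) (cnt : Int) (out : Int) : Prop := out = solution_alt cards cnt
instance (cards : List Int) (cnt : Int) (out : Int) : Decidable (Spec_solution cards cnt out) := by unfold Spec_solution; infer_instance

-- ===== CLAIM (what is proved, stated in full; the proofs are below) =====
def Claim_equal_solution : Prop := ∀ (cards : List Int) (cnt : Int), Dom_solution cards cnt → Pre_solution cards cnt → Spec_solution cards cnt (solution cards cnt)

-- ===== LEMMAS AND PROOFS =====

-- the invariant of B's state: both queues sorted and, unless the last merged value L
-- is still the global minimum (pend = [L, L] below everything), any two elements of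
-- the remaining multiset sum to at least L — so the next merge lands at pend's back
def QInv (r p : List Int) : Prop :=
  r.Pairwise (· ≤ ·) ∧ p.Pairwise (· ≤ ·) ∧
  ∀ L, p.getLast? = some L →
    (∀ x ∈ r ++ p, ∀ y ∈ (r ++ p).erase x, L ≤ x + y) ∨
    (p = [L, L] ∧ ∀ z ∈ r ++ p, L ≤ z)

lemma min?_eq_of_lb {xs : List Int} {a : Int}
    (hmem : a ∈ xs) (hle : ∀ y ∈ xs, a ≤ y) : xs.min? = some a :=
  List.min?_eq_some_iff.mpr ⟨hmem, hle⟩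

lemma pickB_eq_none_iff {r p : List Int} : pickB r p = none ↔ r = [] ∧ p = [] := by
  cases p <;> cases r <;> simp [pickB]
  · split <;> simp

lemma pairwise_head_le {x : Int} {l : List Int} (h : (x :: l).Pairwise (· ≤ ·)) :
    ∀ y ∈ x :: l, x ≤ y := by
  intro y hy
  rcases List.mem_cons.mp hy with rfl | hy
  · exact le_refl _
  · exact (List.pairwise_cons.mp h).1 y hy

lemma pairwise_le_last {l : List Int} {L : Int} (h : l.Pairwise (· ≤ ·))
    (hL : l.getLast? = some L) : ∀ z ∈ l, z ≤ L := by
  intro z hz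
  rcases List.getLast?_eq_some_iff.mp hL with ⟨l', rfl⟩
  rcases List.mem_append.mp hz with hz | hz
  · exact (List.pairwise_append.mp h).2.2 z hz L (by simp)
  · simp at hz; simp [hz]

lemma pickB_spec {r p : List Int} {a : Int} {r' p' : List Int}
    (hr : r.Pairwise (· ≤ ·)) (hp : p.Pairwise (· ≤ ·))
    (h : pickB r p = some (a, r', p')) :
    a ∈ r ++ p ∧ (∀ y ∈ r ++ p, a ≤ y) ∧ ((r ++ p).Perm (a :: (r' ++ p'))) ∧
      r'.Sublist r ∧ p'.Sublist p := by
  cases p with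
  | nil =>
    cases r with
    | nil => simp [pickB] at h
    | cons o os =>
      simp [pickB] at h
      obtain ⟨rfl, rfl, rfl⟩ := h
      exact ⟨by simp, by simpa using pairwise_head_le hr, by simp, by simp, by simp⟩
  | cons x ps =>
    cases r with
    | nil =>
      simp [pickB] at h
      obtain ⟨rfl, rfl, rfl⟩ := h
      exact ⟨by simp, by simpa using pairwise_head_le hp, by simp, by simp, by simp⟩
    | cons o os =>
      by_cases hxo : x ≤ o
      · simp [pickB, hxo] at h
        obtain ⟨rfl, rfl, rfl⟩ := h
        refine ⟨by simp, ?_, List.perm_middle, by simp, by simp⟩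
        intro y hy
        rcases List.mem_append.mp hy with hy | hy
        · exact le_trans hxo (pairwise_head_le hr y hy)
        · exact pairwise_head_le hp y hy
      · simp [pickB, hxo] at h
        obtain ⟨rfl, rfl, rfl⟩ := h
        have hox : o ≤ x := le_of_lt (lt_of_not_ge hxo)
        refine ⟨by simp, ?_, by simp, by simp, by simp⟩
        intro y hy
        rcases List.mem_append.mp hy with hy | hy
        · exact pairwise_head_le hr y hy
        · exact le_trans hox (pairwise_head_le hp y hy)

lemma pickB_pair1 {r : List Int} {L : Int} (hall : ∀ z ∈ r, L ≤ z) :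
    pickB r [L, L] = some (L, r, [L]) := by
  cases r with
  | nil => simp [pickB]
  | cons o os => simp [pickB, hall o (by simp)]

lemma pickB_pair2 {r : List Int} {L : Int} (hall : ∀ z ∈ r, L ≤ z) :
    pickB r [L] = some (L, r, []) := by
  cases r with
  | nil => simp [pickB]
  | cons o os => simp [pickB, hall o (by simp)]

lemma getLast?_append_pair (l : List Int) (c : Int) :
    (l ++ [c, c]).getLast? = some c := by
  have : l ++ [c, c] = (l ++ [c]) ++ [c] := by simp
  rw [this, List.getLast?_concat]

lemma loops_rel (n : Nat) : ∀ (xs r p : List Int), QInv r p → xs.Perm (r ++ p) →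
    (solutionLoopA n xs = none ∧ loopB n r p = none) ∨
    (∃ s r' p', solutionLoopA n xs = some s ∧ loopB n r p = some (r', p') ∧
      s.Perm (r' ++ p')) := by
  induction n with
  | zero => intro xs r p _ h; exact Or.inr ⟨xs, r, p, rfl, rfl, h⟩
  | succ n ih =>
    intro xs r p hQInv hxs
    obtain ⟨hrP, hpP, hthird⟩ := hQInv
    cases h1 : pickB r p with
    | none =>
      obtain ⟨rfl, rfl⟩ := pickB_eq_none_iff.mp h1
      have hxnil : xs = [] := by simpa using hxs.eq_nil
      subst hxnil
      exact Or.inl ⟨by simp [solutionLoopA, heapPopA], by simp [loopB, h1]⟩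
    | some t1 =>
      obtain ⟨a, r1, p1⟩ := t1
      obtain ⟨haM, haMin, hMperm, hr1sub, hp1sub⟩ := pickB_spec hrP hpP h1
      have hr1P : r1.Pairwise (· ≤ ·) := hrP.sublist hr1sub
      have hp1P : p1.Pairwise (· ≤ ·) := hpP.sublist hp1sub
      have hminA : xs.min? = some a :=
        min?_eq_of_lb (hxs.mem_iff.mpr haM) (fun y hy => haMin y (hxs.mem_iff.mp hy))
      have hxs1 : (xs.erase a).Perm (r1 ++ p1) := by
        have h2 : xs.Perm (a :: xs.erase a) := List.perm_cons_erase (hxs.mem_iff.mpr haM)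
        exact (h2.symm.trans (hxs.trans hMperm)).cons_inv
      cases h2 : pickB r1 p1 with
      | none =>
        obtain ⟨rfl, rfl⟩ := pickB_eq_none_iff.mp h2
        have hnil : xs.erase a = [] := by simpa using hxs1.eq_nil
        refine Or.inl ⟨?_, by simp [loopB, h1, h2]⟩
        simp [solutionLoopA, heapPopA, hminA, hnil]
      | some t2 =>
        obtain ⟨b, r2, p2⟩ := t2
        obtain ⟨hbM, hbMin, hMperm2, hr2sub, hp2sub⟩ := pickB_spec hr1P hp1P h2
        have hminA2 : (xs.erase a).min? = some b :=
          min?_eq_of_lb (hxs1.mem_iff.mpr hbM) (fun y hy => hbMin y (hxs1.mem_iff.mp hy))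
        have hxs2 : ((xs.erase a).erase b).Perm (r2 ++ p2) := by
          have h3 : (xs.erase a).Perm (b :: (xs.erase a).erase b) :=
            List.perm_cons_erase (hxs1.mem_iff.mpr hbM)
          exact (h3.symm.trans (hxs1.trans hMperm2)).cons_inv
        have hbM' : b ∈ r ++ p := by
          rcases List.mem_append.mp hbM with h | h
          · exact List.mem_append.mpr (Or.inl (hr1sub.mem h))
          · exact List.mem_append.mpr (Or.inr (hp1sub.mem h))
        have hab : a ≤ b := haMin b hbM'
        have hbR : ∀ z ∈ r2 ++ p2, b ≤ z := by
          intro z hz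
          refine hbMin z ?_
          rcases List.mem_append.mp hz with h | h
          · exact List.mem_append.mpr (Or.inl (hr2sub.mem h))
          · exact List.mem_append.mpr (Or.inr (hp2sub.mem h))
        have hbEr : b ∈ (r ++ p).erase a := by
          have hper : ((r ++ p).erase a).Perm (r1 ++ p1) := by
            have h4 : (r ++ p).Perm (a :: (r ++ p).erase a) := List.perm_cons_erase haM
            exact (h4.symm.trans hMperm).cons_inv
          exact hper.mem_iff.mpr hbM
        -- key bounds on the leftover pending queue
        have hkey : (∀ z ∈ p2, z ≤ a + b) ∧ (a < 0 → p2 = []) := by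
          cases hpcase : p with
          | nil =>
            have : p2 = [] := by
              have hs := hp2sub.trans hp1sub
              rw [hpcase] at hs
              exact List.sublist_nil.mp hs
            subst this
            exact ⟨by simp, fun _ => rfl⟩
          | cons q qs =>
            obtain ⟨L, hL⟩ : ∃ L, p.getLast? = some L := by
              rw [hpcase]
              exact ⟨(q :: qs).getLast (by simp), List.getLast?_eq_some_getLast (by simp)⟩
            rcases hthird L hL with hd1 | ⟨hpeq, hLall⟩
            · have hLab : L ≤ a + b := hd1 a haM b hbEr
              have hz_le : ∀ z ∈ p2, z ≤ a + b := fun z hz =>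
                le_trans (pairwise_le_last hpP hL z (hp1sub.mem (hp2sub.mem hz))) hLab
              refine ⟨hz_le, fun ha0 => ?_⟩
              rw [List.eq_nil_iff_forall_not_mem]
              intro z hz
              have h5 : b ≤ z := hbR z (List.mem_append.mpr (Or.inr hz))
              have h6 : z ≤ a + b := hz_le z hz
              omega
            · -- pend = [L, L] and L is a global lower bound: both picks are forced
              have e1 : pickB r p = some (L, r, [L]) := by
                rw [hpeq]
                exact pickB_pair1 (fun z hz => hLall z (by rw [hpeq]; exact List.mem_append.mpr (Or.inl hz)))
              rw [e1] at h1
              simp only [Option.some.injEq, Prod.mk.injEq] at h1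
              obtain ⟨ha, hr1, hp1⟩ := h1
              have e2 : pickB r1 p1 = some (L, r1, []) := by
                rw [← hp1, ← hr1]
                exact pickB_pair2 (fun z hz => hLall z (List.mem_append.mpr (Or.inl hz)))
              rw [e2] at h2
              simp only [Option.some.injEq, Prod.mk.injEq] at h2
              obtain ⟨-, -, hp2⟩ := h2
              rw [← hp2]
              exact ⟨by simp, fun _ => rfl⟩
        -- the new state satisfies the invariant
        have hnewInv : QInv r2 (p2 ++ [a + b, a + b]) := by
          refine ⟨hr1P.sublist hr2sub, ?_, ?_⟩
          · rw [List.pairwise_append]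
            refine ⟨hp1P.sublist hp2sub, by simp, ?_⟩
            intro x hx y hy
            have : x ≤ a + b := hkey.1 x hx
            simp at hy
            omega
          · intro L' hL'
            rw [getLast?_append_pair] at hL'
            obtain rfl : L' = a + b := by injection hL' with h; exact h.symm
            by_cases ha0 : 0 ≤ a
            · left
              have hall : ∀ z ∈ r2 ++ (p2 ++ [a + b, a + b]), b ≤ z := by
                intro z hz
                rcases List.mem_append.mp hz with h | h
                · exact hbR z (List.mem_append.mpr (Or.inl h))
                · rcases List.mem_append.mp h with h | h
                  · exact hbR z (List.mem_append.mpr (Or.inr h))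
                  · simp at h; omega
              intro x hx y hy
              have hy' : y ∈ r2 ++ (p2 ++ [a + b, a + b]) := List.mem_of_mem_erase hy
              have := hall x hx
              have := hall y hy'
              omega
            · right
              have hp2nil : p2 = [] := hkey.2 (by omega)
              subst hp2nil
              refine ⟨by simp, ?_⟩
              intro z hz
              rcases List.mem_append.mp hz with h | h
              · have := hbR z (List.mem_append.mpr (Or.inl h))
                omega
              · simp at h; omega
        have hnextPerm : (((xs.erase a).erase b) ++ [a + b, a + b]).Perm
            (r2 ++ (p2 ++ [a + b, a + b])) := by
          have := hxs2.append_right [a + b, a + b]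
          simpa [List.append_assoc] using this
        have stepA : solutionLoopA (n+1) xs =
            solutionLoopA n (((xs.erase a).erase b) ++ [a + b, a + b]) := by
          simp [solutionLoopA, heapPopA, hminA, hminA2]
        have stepB : loopB (n+1) r p = loopB n r2 (p2 ++ [a + b, a + b]) := by
          simp [loopB, h1, h2]
        rcases ih _ _ _ hnewInv hnextPerm with ⟨hA, hB⟩ | ⟨s, r', p', hA, hB, hsp⟩
        · exact Or.inl ⟨stepA ▸ hA, stepB ▸ hB⟩
        · exact Or.inr ⟨s, r', p', stepA ▸ hA, stepB ▸ hB, hsp⟩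

-- ===== VERDICT (by name: the statement is the Claim_ definition above) =====
theorem solution_spec : Claim_equal_solution := by
  intro cards cnt _ _
  unfold Spec_solution solution solution_alt
  have hQInv : QInv (PySem.List.sorted cards (fun x => x) false) [] := by
    refine ⟨?_, by simp, by simp⟩
    simpa using PySem.List.sorted_pairwise cards (fun x => x)
  have hperm : cards.Perm (PySem.List.sorted cards (fun x => x) false ++ []) := by
    simpa using (PySem.List.sorted_perm cards (fun x => x) false).symm
  rcases loops_rel cnt.toNat cards _ _ hQInv hperm with ⟨hA, hB⟩ | ⟨s, r', p', hA, hB, hsp⟩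
  · simp [hA, hB]
  · simp only [hA, hB]
    simpa [List.sum_append] using hsp.sum_eq
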